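-- pv_equiv track=rewrite | github.com/tony20202021/words | words/clean_json_file.py | merge_descriptions
-- ===== SOURCE A (Python) =====
-- def merge_descriptions(desc1, desc2):
--     raw_merged = []
--     seen_lower = set()
--
--     for d in desc1 + desc2:
--         key = d.strip().lower()
--         if key not in seen_lower:
--             seen_lower.add(key)
--             raw_merged.append(d.strip())
--
--     # Удалим подстроки
--     final = []
--     for d in raw_merged:
--         if not any((d != other and d in other) for other in raw_merged):
--             final.append(d)
--     return final
-- ===== SOURCE B (Python) =====
-- def merge_descriptions(desc1, desc2):
--     # dedupe: keep entry i iff its lowercase key first occurs at position i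
--     stripped = [d.strip() for d in desc1 + desc2]
--     keys = [s.lower() for s in stripped]
--     vals = [s for i, s in enumerate(stripped) if keys.index(s.lower()) == i]
--     # sort by length descending: any string strictly containing d precedes d,
--     # so d is dominated iff the strictly-longer prefix of the sorted order contains it
--     order = sorted(vals, key=len, reverse=True)
--     dominated = set()
--     for i, d in enumerate(order):
--         for o in order[:i]:
--             if len(d) < len(o) and d in o:
--                 dominated.add(d)
--                 break
--     return [d for d in vals if d not in dominated]
-- ===== Notes on version B (the rewrite author's own statement) =====
-- stated objective: alternative
-- what changed: B dedupes by a positional first-occurrence test (keys.index(k)==i over staged comprehensions) instead of A's seen-set accumulator loop, and replaces A's full quadratic any-scan over all pairs by sorting the survivors by length descending and checking each entry only against its strictly-longer sorted prefix, breaking on the first hit.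
import Mathlib
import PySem

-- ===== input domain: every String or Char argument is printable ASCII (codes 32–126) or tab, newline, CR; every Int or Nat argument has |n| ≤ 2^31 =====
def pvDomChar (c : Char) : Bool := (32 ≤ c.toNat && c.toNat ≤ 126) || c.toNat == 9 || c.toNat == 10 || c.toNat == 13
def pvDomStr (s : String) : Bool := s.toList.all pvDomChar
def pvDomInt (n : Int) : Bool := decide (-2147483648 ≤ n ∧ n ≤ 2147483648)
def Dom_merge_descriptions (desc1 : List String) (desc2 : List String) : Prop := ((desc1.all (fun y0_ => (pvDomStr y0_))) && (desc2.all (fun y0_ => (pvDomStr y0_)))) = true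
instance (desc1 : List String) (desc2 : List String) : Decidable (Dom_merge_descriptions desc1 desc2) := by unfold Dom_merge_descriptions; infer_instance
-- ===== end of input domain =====

-- B dedupes by a positional first-occurrence test (keys.index(k) == i) instead of A's
-- seen-set loop, and finds dominated entries by sorting by length descending and scanning
-- only each entry's strictly-longer prefix instead of A's all-pairs any-scan (objective: alternative).

-- ===== PORT A =====
def merge_descriptions (desc1 : List String) (desc2 : List String) : List String :=
  let st := (desc1 ++ desc2).foldl
    (fun (st : List String × PySem.Set String) d =>
      let key := PySem.Str.lower (PySem.Str.strip d)
      if PySem.Set.contains st.2 key then st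
      else (st.1 ++ [PySem.Str.strip d], PySem.Set.add st.2 key))
    ([], PySem.Set.empty)
  let raw := st.1
  raw.foldl
    (fun final d =>
      if !(raw.any fun other => decide (d ≠ other) && PySem.Str.isIn d other)
      then final ++ [d] else final) []

-- ===== PORT B =====
def merge_descriptions_alt (desc1 : List String) (desc2 : List String) : List String :=
  let stripped := (desc1 ++ desc2).map PySem.Str.strip
  let keys := stripped.map PySem.Str.lower
  let vals := (PySem.List.enumerate stripped).filterMap
    (fun p => if (PySem.List.index? keys (PySem.Str.lower p.2)).map (fun n => ((n : Nat) : Int)) = some p.1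
              then some p.2 else none)
  let order := PySem.List.sorted vals (fun s => PySem.Str.len s) true
  let dominated := (PySem.List.enumerate order).foldl
    (fun (dom : PySem.Set String) p =>
      if (PySem.List.slice order (some 0) (some p.1)).any
           (fun o => decide (PySem.Str.len p.2 < PySem.Str.len o) && PySem.Str.isIn p.2 o)
      then PySem.Set.add dom p.2 else dom)
    PySem.Set.empty
  vals.filter (fun d => !(PySem.Set.contains dominated d))

-- ===== PRECONDITION & SPEC =====
def Spec_merge_descriptions (desc1 : List String) (desc2 : List String) (out : List String) : Prop := out = merge_descriptions_alt desc1 desc2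
instance (desc1 : List String) (desc2 : List String) (out : List String) : Decidable (Spec_merge_descriptions desc1 desc2 out) := by unfold Spec_merge_descriptions; infer_instance

-- ===== CLAIM (what is proved, stated in full; the proofs are below) =====
def Claim_equal_merge_descriptions : Prop := ∀ (desc1 : List String) (desc2 : List String), Dom_merge_descriptions desc1 desc2 → Spec_merge_descriptions desc1 desc2 (merge_descriptions desc1 desc2)

-- ===== LEMMAS AND PROOFS =====

-- common specification of the dedup phase: first stripped value per lowercase key
def pvDedup : List String → List String → List String
  | _, [] => []
  | sl, d :: t =>
    if PySem.Str.lower (PySem.Str.strip d) ∈ sl then pvDedup sl t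
    else PySem.Str.strip d :: pvDedup (PySem.Str.lower (PySem.Str.strip d) :: sl) t

-- A's dedup fold produces pvDedup
lemma pv_A_fold (l : List String) : ∀ (raw : List String) (seen : PySem.Set String) (sl : List String),
    (∀ x, PySem.Set.contains seen x = true ↔ x ∈ sl) →
    (l.foldl (fun (st : List String × PySem.Set String) d =>
      if PySem.Set.contains st.2 (PySem.Str.lower (PySem.Str.strip d)) then st
      else (st.1 ++ [PySem.Str.strip d], PySem.Set.add st.2 (PySem.Str.lower (PySem.Str.strip d)))) (raw, seen)).1
    = raw ++ pvDedup sl l := by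
  induction l with
  | nil => intro raw seen sl _; simp [pvDedup]
  | cons d t ih =>
    intro raw seen sl h
    simp only [List.foldl_cons, pvDedup]
    by_cases hc : PySem.Set.contains seen (PySem.Str.lower (PySem.Str.strip d)) = true
    · rw [if_pos hc, if_pos (h _ |>.mp hc)]
      exact ih raw seen sl h
    · have hns : PySem.Str.lower (PySem.Str.strip d) ∉ sl := fun hm => hc ((h _).mpr hm)
      rw [if_neg hc, if_neg hns]
      rw [ih (raw ++ [PySem.Str.strip d]) _ (PySem.Str.lower (PySem.Str.strip d) :: sl) ?_]
      · simp
      · intro x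
        rw [PySem.Set.contains_iff, PySem.Set.mem_add]
        have hx : x ∈ seen ↔ x ∈ sl := (PySem.Set.contains_iff seen x).symm.trans (h x)
        simp [hx, or_comm]

-- B's index?-based comprehension produces pvDedup
lemma pv_B_filterMap (l : List String) : ∀ (pre sl : List String),
    (∀ x, x ∈ pre ↔ x ∈ sl) →
    (PySem.List.enumerate (l.map PySem.Str.strip) ((pre.length : Int))).filterMap
      (fun p => if (PySem.List.index? (pre ++ l.map (fun d => PySem.Str.lower (PySem.Str.strip d)))
                      (PySem.Str.lower p.2)).map (fun n => ((n : Nat) : Int)) = some p.1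
                then some p.2 else none)
    = pvDedup sl l := by
  induction l with
  | nil => intro pre sl _; simp [pvDedup, PySem.List.enumerate_nil]
  | cons d t ih =>
    intro pre sl h
    have hK : pre ++ PySem.Str.lower (PySem.Str.strip d) :: t.map (fun d => PySem.Str.lower (PySem.Str.strip d))
        = (pre ++ [PySem.Str.lower (PySem.Str.strip d)]) ++ t.map (fun d => PySem.Str.lower (PySem.Str.strip d)) := by
      simp
    have hlen : (pre.length : Int) + 1 = (((pre ++ [PySem.Str.lower (PySem.Str.strip d)]).length : Nat) : Int) := by
      simp
    simp only [List.map_cons, PySem.List.enumerate_cons]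
    by_cases hk : PySem.Str.lower (PySem.Str.strip d) ∈ pre
    · obtain ⟨j, hj⟩ := Option.isSome_iff_exists.mp
        ((PySem.List.index?_isSome_iff pre (PySem.Str.lower (PySem.Str.strip d))).mpr hk)
      obtain ⟨hjlt, -⟩ := PySem.List.getElem_of_index?_eq_some hj
      have hidx : PySem.List.index?
          (pre ++ PySem.Str.lower (PySem.Str.strip d) :: t.map (fun d => PySem.Str.lower (PySem.Str.strip d)))
          (PySem.Str.lower (PySem.Str.strip d)) = some j := by
        rw [show pre ++ PySem.Str.lower (PySem.Str.strip d) :: t.map (fun d => PySem.Str.lower (PySem.Str.strip d))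
              = pre ++ (PySem.Str.lower (PySem.Str.strip d) :: t.map (fun d => PySem.Str.lower (PySem.Str.strip d))) from rfl,
            PySem.List.index?_append_of_mem _ hk, hj]
      rw [List.filterMap_cons_none (by
        simp only [hidx, Option.map_some]
        exact if_neg (by simp; omega))]
      simp only [hK, hlen]
      rw [ih (pre ++ [PySem.Str.lower (PySem.Str.strip d)]) sl ?_]
      · simp only [pvDedup, if_pos ((h _).mp hk)]
      · intro x
        simp only [List.mem_append, List.mem_cons]
        constructor
        · rintro (hp | (rfl | h0))
          · exact (h x).mp hp
          · exact (h _).mp hk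
          · cases h0
        · intro hs; exact Or.inl ((h x).mpr hs)
    · have hidx : PySem.List.index?
          (pre ++ PySem.Str.lower (PySem.Str.strip d) :: t.map (fun d => PySem.Str.lower (PySem.Str.strip d)))
          (PySem.Str.lower (PySem.Str.strip d)) = some pre.length := by
        apply (PySem.List.index?_eq_some_iff _ _ _).mpr
        exact ⟨pre, t.map (fun d => PySem.Str.lower (PySem.Str.strip d)), rfl, rfl, hk⟩
      rw [List.filterMap_cons_some (b := PySem.Str.strip d) (by simp only [hidx, Option.map_some]; exact if_pos trivial)]
      simp only [hK, hlen]
      rw [ih (pre ++ [PySem.Str.lower (PySem.Str.strip d)])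
            (PySem.Str.lower (PySem.Str.strip d) :: sl) ?_]
      · simp only [pvDedup, if_neg (fun hm => hk ((h _).mpr hm))]
      · intro x
        simp only [List.mem_append, List.mem_cons]
        constructor
        · rintro (hp | (rfl | h0))
          · exact Or.inr ((h x).mp hp)
          · exact Or.inl rfl
          · cases h0
        · rintro (rfl | hs)
          · exact Or.inr (Or.inl rfl)
          · exact Or.inl ((h x).mpr hs)

-- membership in B's dominated-set fold
lemma pv_dom_fold (order : List String) : ∀ (l : List String) (k : Nat), order.drop k = l →
    ∀ (dom : PySem.Set String) (x : String),
    (x ∈ (PySem.List.enumerate l (k : Int)).foldl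
       (fun (dom : PySem.Set String) p =>
          if (PySem.List.slice order (some 0) (some p.1)).any
               (fun o => decide (PySem.Str.len p.2 < PySem.Str.len o) && PySem.Str.isIn p.2 o)
          then PySem.Set.add dom p.2 else dom) dom)
    ↔ x ∈ dom ∨ ∃ i, ∃ _ : i < order.length, k ≤ i ∧ order[i] = x ∧
        ((order.take i).any (fun o => decide (PySem.Str.len x < PySem.Str.len o) && PySem.Str.isIn x o)) = true := by
  intro l
  induction l with
  | nil =>
    intro k hk dom x
    have hlen : order.length ≤ k := by
      have := congrArg List.length hk
      simp [List.length_drop] at this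
      omega
    simp only [PySem.List.enumerate_nil, List.foldl_nil]
    constructor
    · exact Or.inl
    · rintro (hd | ⟨i, hi, hki, -⟩)
      · exact hd
      · omega
  | cons d t ih =>
    intro k hk dom x
    have hklt : k < order.length := by
      have := congrArg List.length hk
      simp [List.length_drop] at this
      omega
    have hcons : order[k] :: order.drop (k + 1) = d :: t := by
      rw [← List.drop_eq_getElem_cons hklt, hk]
    have hdk : order[k] = d := (List.cons.injEq _ _ _ _ ▸ hcons).1
    have htk : order.drop (k + 1) = t := (List.cons.injEq _ _ _ _ ▸ hcons).2
    have hsl : PySem.List.slice order (some 0) (some (k : Int)) = order.take k := by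
      simp [PySem.List.slice_to_natCast]
    have hcast : (k : Int) + 1 = ((k + 1 : Nat) : Int) := by push_cast; ring
    simp only [PySem.List.enumerate_cons, List.foldl_cons, hsl, hcast]
    by_cases hc : ((order.take k).any
        (fun o => decide (PySem.Str.len d < PySem.Str.len o) && PySem.Str.isIn d o)) = true
    · rw [if_pos hc, ih (k + 1) htk (PySem.Set.add dom d) x]
      rw [PySem.Set.mem_add]
      constructor
      · rintro ((hd | rfl) | ⟨i, hi, hki, hxi, hany⟩)
        · exact Or.inl hd
        · exact Or.inr ⟨k, hklt, le_refl k, hdk, hdk ▸ hc⟩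
        · exact Or.inr ⟨i, hi, by omega, hxi, hany⟩
      · rintro (hd | ⟨i, hi, hki, hxi, hany⟩)
        · exact Or.inl (Or.inl hd)
        · rcases Nat.eq_or_lt_of_le hki with rfl | hlt
          · exact Or.inl (Or.inr (by rw [← hxi, hdk]))
          · exact Or.inr ⟨i, hi, hlt, hxi, hany⟩
    · rw [if_neg hc, ih (k + 1) htk dom x]
      constructor
      · rintro (hd | ⟨i, hi, hki, hxi, hany⟩)
        · exact Or.inl hd
        · exact Or.inr ⟨i, hi, by omega, hxi, hany⟩
      · rintro (hd | ⟨i, hi, hki, hxi, hany⟩)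
        · exact Or.inl hd
        · rcases Nat.eq_or_lt_of_le hki with rfl | hlt
          · have hxd : x = d := by rw [← hxi, hdk]
            subst hxd
            exact absurd hany hc
          · exact Or.inr ⟨i, hi, hlt, hxi, hany⟩

-- dominated ⟺ some strictly longer element of vals contains it
lemma pv_dominated_iff (vals : List String) (x : String) (hx : x ∈ vals) :
    PySem.Set.contains
      ((PySem.List.enumerate (PySem.List.sorted vals (fun s => PySem.Str.len s) true)).foldl
        (fun (dom : PySem.Set String) p =>
          if (PySem.List.slice (PySem.List.sorted vals (fun s => PySem.Str.len s) true) (some 0) (some p.1)).any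
               (fun o => decide (PySem.Str.len p.2 < PySem.Str.len o) && PySem.Str.isIn p.2 o)
          then PySem.Set.add dom p.2 else dom)
        PySem.Set.empty) x = true
    ↔ ∃ o ∈ vals, PySem.Str.len x < PySem.Str.len o ∧ PySem.Str.isIn x o = true := by
  rw [PySem.Set.contains_iff]
  have hfold := pv_dom_fold (PySem.List.sorted vals (fun s => PySem.Str.len s) true)
      (PySem.List.sorted vals (fun s => PySem.Str.len s) true) 0 (by simp) PySem.Set.empty x
  simp only [Nat.cast_zero] at hfold
  rw [hfold]
  have hempty : x ∉ PySem.Set.empty := by simp [PySem.Set.empty]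
  constructor
  · rintro (hd | ⟨i, hi, -, hxi, hany⟩)
    · exact absurd hd hempty
    · rw [List.any_eq_true] at hany
      obtain ⟨o, ho, hcond⟩ := hany
      simp only [Bool.and_eq_true, decide_eq_true_eq] at hcond
      refine ⟨o, ?_, hcond.1, hcond.2⟩
      exact (PySem.List.mem_sorted _ _ _ _).mp (List.mem_of_mem_take ho)
  · rintro ⟨o, ho, hlt, hin⟩
    have hxo : x ∈ PySem.List.sorted vals (fun s => PySem.Str.len s) true :=
      (PySem.List.mem_sorted _ _ _ _).mpr hx
    obtain ⟨i, hi, hxi⟩ := List.getElem_of_mem hxo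
    obtain ⟨j, hj, hji⟩ := List.getElem_of_mem ((PySem.List.mem_sorted vals (fun s => PySem.Str.len s) true o).mpr ho)
    have hpair : (PySem.List.sorted vals (fun s => PySem.Str.len s) true).Pairwise
        (fun a b => PySem.Str.len b ≤ PySem.Str.len a) := PySem.List.sorted_pairwise_rev ..
    rw [List.pairwise_iff_getElem] at hpair
    have hjlt : j < i := by
      rcases Nat.lt_trichotomy j i with h | rfl | h
      · exact h
      · rw [hxi] at hji; rw [hji] at hlt; exact absurd hlt (lt_irrefl _)
      · have := hpair i j hi hj h
        rw [hxi, hji] at this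
        exact absurd hlt (not_lt_of_ge this)
    refine Or.inr ⟨i, hi, Nat.zero_le i, hxi, ?_⟩
    rw [List.any_eq_true]
    refine ⟨o, ?_, by simp only [Bool.and_eq_true, decide_eq_true_eq]; exact ⟨hlt, hin⟩⟩
    apply List.mem_iff_getElem.mpr
    refine ⟨j, by rw [List.length_take]; omega, ?_⟩
    rw [List.getElem_take]
    exact hji

-- proper substring equals strictly shorter substring
lemma pv_key (d o : String) :
    ((d ≠ o ∧ PySem.Str.isIn d o = true) ↔ (PySem.Str.len d < PySem.Str.len o ∧ PySem.Str.isIn d o = true)) := by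
  constructor
  · rintro ⟨hne, hin⟩
    refine ⟨?_, hin⟩
    have hinf : d.toList <:+: o.toList := (PySem.Str.isIn_iff_infix d o).mp hin
    have hle : d.toList.length ≤ o.toList.length := hinf.length_le
    rcases lt_or_eq_of_le hle with hlt | heq
    · simpa [PySem.Str.len_eq] using hlt
    · exact absurd (String.toList_inj.mp (hinf.sublist.eq_of_length heq)) hne
  · rintro ⟨hlt, hin⟩
    refine ⟨?_, hin⟩
    rintro rfl
    exact lt_irrefl _ hlt

-- ===== VERDICT (by name: the statement is the Claim_ definition above) =====
theorem merge_descriptions_spec : Claim_equal_merge_descriptions := by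
  intro desc1 desc2 _
  show merge_descriptions desc1 desc2 = merge_descriptions_alt desc1 desc2
  simp only [merge_descriptions, merge_descriptions_alt]
  have hraw : ((desc1 ++ desc2).foldl
      (fun (st : List String × PySem.Set String) d =>
        if PySem.Set.contains st.2 (PySem.Str.lower (PySem.Str.strip d)) then st
        else (st.1 ++ [PySem.Str.strip d], PySem.Set.add st.2 (PySem.Str.lower (PySem.Str.strip d))))
      ([], PySem.Set.empty)).1 = pvDedup [] (desc1 ++ desc2) := by
    have h0 : ∀ x, PySem.Set.contains PySem.Set.empty x = true ↔ x ∈ ([] : List String) := by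
      intro x
      rw [PySem.Set.contains_iff]
      simp [PySem.Set.empty]
    rw [pv_A_fold _ _ _ _ h0]
    simp
  have hvals : ((PySem.List.enumerate ((desc1 ++ desc2).map PySem.Str.strip)).filterMap
      (fun p => if (PySem.List.index? (((desc1 ++ desc2).map PySem.Str.strip).map PySem.Str.lower)
                      (PySem.Str.lower p.2)).map (fun n => ((n : Nat) : Int)) = some p.1
                then some p.2 else none))
      = pvDedup [] (desc1 ++ desc2) := by
    have := pv_B_filterMap (desc1 ++ desc2) [] [] (by simp)
    simpa [List.map_map, Function.comp] using this
  rw [hraw, hvals]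
  rw [PySem.List.foldl_append_if_eq_filter]
  simp only [List.nil_append]
  apply List.filter_congr
  intro x hx
  congr 1
  rw [Bool.eq_iff_iff]
  rw [pv_dominated_iff _ x hx]
  simp only [List.any_eq_true, Bool.and_eq_true, decide_eq_true_eq]
  constructor
  · rintro ⟨o, ho, hne, hin⟩
    exact ⟨o, ho, (pv_key x o).mp ⟨hne, hin⟩⟩
  · rintro ⟨o, ho, hlt, hin⟩
    obtain ⟨hne, hin'⟩ := (pv_key x o).mpr ⟨hlt, hin⟩
    exact ⟨o, ho, hne, hin'⟩
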